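-- pv_equiv track=rewrite | github.com/msys2/msys2-web | main.py | parse_desc
-- ===== SOURCE A (Python) =====
-- from typing import List, Set, Dict, Tuple, Optional, Generator, Any, Type, Callable, Union
--
-- def parse_desc(t: str) -> Dict[str, List[str]]:
--     d: Dict[str, List[str]] = {}
--     cat = None
--     values: List[str] = []
--     for l in t.splitlines():
--         l = l.strip()
--         if cat is None:
--             cat = l
--         elif not l:
--             d[cat] = values
--             cat = None
--             values = []
--         else:
--             values.append(l)
--     if cat is not None:
--         d[cat] = values
--     return d
-- ===== SOURCE B (Python) =====
-- def parse_desc(t: str) -> dict: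
--     d = {}
--     lines = t.splitlines()
--     n = len(lines)
--     i = 0
--     while i < n:
--         cat = lines[i].strip()
--         i += 1
--         values = []
--         while i < n and lines[i].strip():
--             values.append(lines[i].strip())
--             i += 1
--         d[cat] = values
--         i += 1  # skip the separating blank line
--     return d
-- ===== Notes on version B (the rewrite author's own statement) =====
-- stated objective: alternative
-- what changed: Replaces A's single fold carrying a (dict, current-category-or-None, pending-values) state machine by an explicit index walk over the materialized line list: an outer while loop reads a category line, an inner while loop collects the following non-blank stripped lines as its values, then the separating blank line is skipped.
import Mathlib
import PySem

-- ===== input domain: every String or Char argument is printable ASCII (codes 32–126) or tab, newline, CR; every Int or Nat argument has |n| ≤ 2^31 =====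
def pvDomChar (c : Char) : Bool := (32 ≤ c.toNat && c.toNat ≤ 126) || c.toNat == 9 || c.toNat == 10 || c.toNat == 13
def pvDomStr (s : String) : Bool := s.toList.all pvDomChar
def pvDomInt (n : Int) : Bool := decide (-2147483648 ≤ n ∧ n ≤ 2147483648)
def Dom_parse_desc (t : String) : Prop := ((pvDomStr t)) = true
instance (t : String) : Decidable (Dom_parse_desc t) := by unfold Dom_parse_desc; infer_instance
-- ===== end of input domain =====

-- B replaces A's three-variable state machine by an explicit index walk over the materialized
-- line list with an inner group-collecting loop (alternative decomposition, same cost).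

-- ===== PORT A =====
-- A's loop state: (dict, current category or None, pending values)
def pdAStep (s : PySem.Dict String (List String) × Option String × List String)
    (l : String) : PySem.Dict String (List String) × Option String × List String :=
  let l := PySem.Str.strip l
  match s with
  | (d, none, values) => (d, some l, values)
  | (d, some c, values) =>
    if l = "" then (d.insert c values, none, [])
    else (d, some c, values ++ [l])

def pdAFinish (s : PySem.Dict String (List String) × Option String × List String) :
    List (String × List String) :=
  match s with
  | (d, none, _) => d.items
  | (d, some c, values) => (d.insert c values).items

def parse_desc (t : String) : List (String × List String) :=
  pdAFinish ((PySem.Str.splitlines t).foldl pdAStep (PySem.Dict.empty, none, []))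

-- ===== PORT B =====
-- inner 'while i < n and lines[i].strip(): values.append(...); i += 1' loop; returns the
-- collected values and the stopping index.  The fuel argument only makes the while loop a
-- total structural recursion (fuel = number of lines always suffices; see pdInner_fuel).
def pdInner (lines : List String) : Nat → Nat → List String → List String × Nat
  | 0, i, values => (values, i)
  | fuel + 1, i, values =>
    if h : i < lines.length then
      let l := PySem.Str.strip lines[i]
      if l ≠ "" then pdInner lines fuel (i + 1) (values ++ [l]) else (values, i)
    else (values, i)

-- outer 'while i < n' loop: read the category line, collect its values, skip the blank line
def pdOuter (lines : List String) :
    Nat → Nat → PySem.Dict String (List String) → PySem.Dict String (List String)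
  | 0, _, d => d
  | fuel + 1, i, d =>
    if h : i < lines.length then
      let cat := PySem.Str.strip lines[i]
      let r := pdInner lines lines.length (i + 1) []
      pdOuter lines fuel (r.2 + 1) (d.insert cat r.1)
    else d

def parse_desc_alt (t : String) : List (String × List String) :=
  let lines := PySem.Str.splitlines t
  (pdOuter lines lines.length 0 PySem.Dict.empty).items

-- ===== PRECONDITION & SPEC =====
def Spec_parse_desc (t : String) (out : List (String × List String)) : Prop := out = parse_desc_alt t
instance (t : String) (out : List (String × List String)) : Decidable (Spec_parse_desc t out) := by unfold Spec_parse_desc; infer_instance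

-- ===== CLAIM (what is proved, stated in full; the proofs are below) =====
def Claim_equal_parse_desc : Prop := ∀ (t : String), Dom_parse_desc t → Spec_parse_desc t (parse_desc t)

-- ===== LEMMAS AND PROOFS =====

-- the inner loop never moves the index backwards
theorem pdInner_le (lines : List String) :
    ∀ fuel i values, i ≤ (pdInner lines fuel i values).2 := by
  intro fuel
  induction fuel with
  | zero => intro i values; simp [pdInner]
  | succ f ih =>
    intro i values
    simp only [pdInner]
    split
    · split
      · exact le_trans (by omega) (ih (i + 1) _)
      · exact le_refl i
    · exact le_refl i

-- any fuel ≥ (remaining lines) gives the same result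
theorem pdInner_fuel (lines : List String) :
    ∀ f1 f2 i values, lines.length - i ≤ f1 → lines.length - i ≤ f2 →
      pdInner lines f1 i values = pdInner lines f2 i values := by
  intro f1
  induction f1 with
  | zero =>
    intro f2 i values h1 _
    cases f2 with
    | zero => rfl
    | succ g => simp only [pdInner]; rw [dif_neg (by omega)]
  | succ f ih =>
    intro f2 i values h1 h2
    cases f2 with
    | zero => simp only [pdInner]; rw [dif_neg (by omega)]
    | succ g =>
      simp only [pdInner]
      by_cases hi : i < lines.length
      · rw [dif_pos hi, dif_pos hi]
        by_cases hb : PySem.Str.strip lines[i] = ""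
        · simp [hb]
        · simp only [ne_eq, hb, not_false_eq_true, if_true]
          exact ih g (i + 1) _ (by omega) (by omega)
      · rw [dif_neg hi, dif_neg hi]

theorem pdOuter_fuel (lines : List String) :
    ∀ f1 f2 i d, lines.length - i ≤ f1 → lines.length - i ≤ f2 →
      pdOuter lines f1 i d = pdOuter lines f2 i d := by
  intro f1
  induction f1 with
  | zero =>
    intro f2 i d h1 _
    cases f2 with
    | zero => rfl
    | succ g => simp only [pdOuter]; rw [dif_neg (by omega)]
  | succ f ih =>
    intro f2 i d h1 h2
    cases f2 with
    | zero => simp only [pdOuter]; rw [dif_neg (by omega)]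
    | succ g =>
      simp only [pdOuter]
      by_cases hi : i < lines.length
      · rw [dif_pos hi, dif_pos hi]
        have hle := pdInner_le lines lines.length (i + 1) []
        exact ih g _ _ (by omega) (by omega)
      · rw [dif_neg hi, dif_neg hi]

-- one-step unfolding lemmas at the canonical fuel lines.length
theorem pdOuter_stop (lines : List String) (f i : Nat) (d : PySem.Dict String (List String))
    (hi : ¬ i < lines.length) : pdOuter lines f i d = d := by
  cases f with
  | zero => rfl
  | succ g => simp only [pdOuter]; rw [dif_neg hi]

theorem pdOuter_step (lines : List String) (i : Nat) (d : PySem.Dict String (List String))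
    (hi : i < lines.length) :
    pdOuter lines lines.length i d =
      pdOuter lines lines.length ((pdInner lines lines.length (i + 1) []).2 + 1)
        (d.insert (PySem.Str.strip lines[i]) (pdInner lines lines.length (i + 1) []).1) := by
  obtain ⟨g, hg⟩ : ∃ g, lines.length = g + 1 := ⟨lines.length - 1, by omega⟩
  conv_lhs => rw [hg]
  simp only [pdOuter]
  rw [dif_pos (by omega : i < lines.length)]
  have hle := pdInner_le lines lines.length (i + 1) []
  exact pdOuter_fuel lines g lines.length _ _ (by omega) (by omega)

theorem pdInner_stop (lines : List String) (f i : Nat) (values : List String)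
    (h : ¬ (i < lines.length ∧ PySem.Str.strip (lines.getD i "") ≠ "")) :
    pdInner lines f i values = (values, i) := by
  cases f with
  | zero => rfl
  | succ g =>
    simp only [pdInner]
    by_cases hi : i < lines.length
    · rw [dif_pos hi]
      have hb : ¬ PySem.Str.strip lines[i] ≠ "" := by
        intro hb; exact h ⟨hi, by rwa [List.getD_eq_getElem _ _ hi]⟩
      simp [hb]
    · rw [dif_neg hi]

theorem pdInner_step (lines : List String) (i : Nat) (values : List String)
    (hi : i < lines.length) (hb : PySem.Str.strip lines[i] ≠ "") :
    pdInner lines lines.length i values =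
      pdInner lines lines.length (i + 1) (values ++ [PySem.Str.strip lines[i]]) := by
  obtain ⟨g, hg⟩ : ∃ g, lines.length = g + 1 := ⟨lines.length - 1, by omega⟩
  conv_lhs => rw [hg]
  simp only [pdInner]
  rw [dif_pos (by omega : i < lines.length)]
  simp only [ne_eq, hb, not_false_eq_true, if_true]
  exact pdInner_fuel lines g lines.length _ _ (by omega) (by omega)

-- Main invariant, proved by strong induction on the number of remaining lines:
--  P: from the 'cat is None' state at index i, A's fold finalizes to pdOuter from i;
--  Q: from the 'cat = some c' state at index i, A's fold finalizes to what pdOuter's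
--     caller does after the inner collection loop starting at i.
theorem pd_main (lines : List String) (k : Nat) :
    ∀ i, lines.length - i = k →
      (∀ d, pdAFinish ((lines.drop i).foldl pdAStep (d, none, [])) =
        (pdOuter lines lines.length i d).items) ∧
      (∀ c values d, pdAFinish ((lines.drop i).foldl pdAStep (d, some c, values)) =
        (pdOuter lines lines.length ((pdInner lines lines.length i values).2 + 1)
          (d.insert c (pdInner lines lines.length i values).1)).items) := by
  induction k using Nat.strong_induction_on with
  | _ k ih =>
    intro i hk
    by_cases hi : i < lines.length
    · have hdrop : lines.drop i = lines[i] :: lines.drop (i + 1) :=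
        List.drop_eq_getElem_cons hi
      have ihnext := ih (lines.length - (i + 1)) (by omega) (i + 1) rfl
      constructor
      · intro d
        rw [hdrop]
        simp only [List.foldl_cons, pdAStep]
        rw [(ihnext.2) (PySem.Str.strip lines[i]) [] d]
        conv_rhs => rw [pdOuter_step lines i d hi]
      · intro c values d
        rw [hdrop]
        simp only [List.foldl_cons, pdAStep]
        by_cases hblank : PySem.Str.strip lines[i] = ""
        · rw [if_pos hblank, (ihnext.1) (d.insert c values)]
          rw [pdInner_stop lines _ i values
            (by rw [List.getD_eq_getElem _ _ hi]; simp [hblank])]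
        · rw [if_neg hblank, (ihnext.2) c (values ++ [PySem.Str.strip lines[i]]) d]
          rw [pdInner_step lines i values hi hblank]
    · have hdrop : lines.drop i = [] := List.drop_eq_nil_of_le (by omega)
      constructor
      · intro d
        rw [hdrop, List.foldl_nil, pdOuter_stop lines _ i d hi]
        rfl
      · intro c values d
        rw [hdrop, List.foldl_nil]
        rw [pdInner_stop lines _ i values (by intro h; exact hi h.1)]
        rw [pdOuter_stop lines _ (i + 1) _ (by omega)]
        rfl

-- ===== VERDICT (by name: the statement is the Claim_ definition above) =====
theorem parse_desc_spec : Claim_equal_parse_desc := by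
  intro t _
  unfold Spec_parse_desc parse_desc parse_desc_alt
  have := (pd_main (PySem.Str.splitlines t) (PySem.Str.splitlines t).length 0 (by omega)).1
    PySem.Dict.empty
  simpa using this
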